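-- pv_equiv track=rewrite | github.com/ESRGv3/shedding-light-static-partitioning-hypervisors | experiments/comm/transfer/transfer.py | dimensions
-- ===== SOURCE A (Python) =====
-- def dimensions(n, max=8):
--     max_width = 4
--     l = 2
--     while True:
--         for w in range(1, max_width+1):
--             if n <= l*w:
--                 return (l, w)
--         l += 1
-- ===== SOURCE B (Python) =====
-- def dimensions(n, max=8):
--     # closed form: smallest l >= 2 with n <= 4*l, then smallest w >= 1 with n <= l*w
--     l = 2 if n <= 8 else -(-n // 4)
--     w = 1 if n <= l else -(-n // l)
--     return (l, w)
-- ===== Notes on version B (the rewrite author's own statement) =====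
-- stated objective: faster
-- what changed: replaced the unbounded search loop over l (with an inner scan over w) by a closed-form ceiling-division computation of l and w
import Mathlib
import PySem

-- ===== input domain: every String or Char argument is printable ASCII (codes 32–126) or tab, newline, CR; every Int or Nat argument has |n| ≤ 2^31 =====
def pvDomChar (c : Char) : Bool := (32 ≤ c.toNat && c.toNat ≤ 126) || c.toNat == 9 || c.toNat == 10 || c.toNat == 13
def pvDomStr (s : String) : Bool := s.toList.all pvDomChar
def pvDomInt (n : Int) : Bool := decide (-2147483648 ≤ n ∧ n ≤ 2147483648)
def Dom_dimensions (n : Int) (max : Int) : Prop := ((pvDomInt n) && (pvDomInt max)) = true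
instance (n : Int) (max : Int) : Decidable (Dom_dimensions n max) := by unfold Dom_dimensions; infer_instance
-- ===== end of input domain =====

-- B replaces A's unbounded search loop by a closed-form ceiling-division computation (objective: faster).

-- ===== PORT A =====
-- the 'while True' loop; the inner 'for w in range(1, 5)' is the four ordered tests;
-- the hypothesis 2 ≤ l only carries the loop invariant needed for termination
def dimLoop (n : Int) (l : Int) (hl : 2 ≤ l) : List Int :=
  if n ≤ l * 1 then [l, 1]
  else if n ≤ l * 2 then [l, 2]
  else if n ≤ l * 3 then [l, 3]
  else if n ≤ l * 4 then [l, 4]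
  else dimLoop n (l + 1) (by omega)
termination_by (n - l).toNat
decreasing_by omega

def dimensions (n : Int) (max : Int) : List Int :=
  dimLoop n 2 (by norm_num)

-- ===== PORT B =====
-- '-(-n // k)' is ceiling division, ported as -(PySem.Int.floordiv (-n) k)
def dimensions_alt (n : Int) (max : Int) : List Int :=
  let l : Int := if n ≤ 8 then 2 else -(PySem.Int.floordiv (-n) 4)
  let w : Int := if n ≤ l then 1 else -(PySem.Int.floordiv (-n) l)
  [l, w]

-- ===== PRECONDITION & SPEC =====
def Spec_dimensions (n : Int) (max : Int) (out : List Int) : Prop := out = dimensions_alt n max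
instance (n : Int) (max : Int) (out : List Int) : Decidable (Spec_dimensions n max out) := by unfold Spec_dimensions; infer_instance

-- ===== CLAIM (what is proved, stated in full; the proofs are below) =====
def Claim_equal_dimensions : Prop := ∀ (n : Int) (max : Int), Dom_dimensions n max → Spec_dimensions n max (dimensions n max)

-- ===== LEMMAS AND PROOFS =====

-- ceiling division bracket: -((-a) // b) ≤ q ↔ a ≤ q * b   (0 < b)
theorem pvCeil_le (a b q : Int) (hb : 0 < b) : (-(PySem.Int.floordiv (-a) b) ≤ q) ↔ a ≤ q * b := by
  rw [neg_le, PySem.Int.le_floordiv_iff_mul_le hb]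
  constructor <;> intro h <;> nlinarith

def Lval (n : Int) : Int := if n ≤ 8 then 2 else -(PySem.Int.floordiv (-n) 4)
def Wval (n : Int) : Int := if n ≤ Lval n then 1 else -(PySem.Int.floordiv (-n) (Lval n))

theorem Lval_ge (n : Int) : 2 ≤ Lval n := by
  unfold Lval; split_ifs with h
  · omega
  · by_contra hc
    have := (pvCeil_le n 4 2 (by norm_num)).mp (by omega)
    omega

theorem Lval_le4 (n : Int) : n ≤ Lval n * 4 := by
  unfold Lval; split_ifs with h
  · omega
  · exact (pvCeil_le n 4 _ (by norm_num)).mp le_rfl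

theorem Lval_min (n l : Int) (hl : 2 ≤ l) (hlt : l < Lval n) : ¬ n ≤ l * 4 := by
  intro hle
  have h8 : ¬ n ≤ 8 := by
    intro h; unfold Lval at hlt; rw [if_pos h] at hlt; omega
  unfold Lval at hlt; rw [if_neg h8] at hlt
  have := (pvCeil_le n 4 l (by norm_num)).mpr (by linarith)
  omega

theorem Wval_eq (n l k : Int) (hl : 2 ≤ l) (hk1 : ¬ n ≤ (k - 1) * l) (hk2 : n ≤ k * l) :
    -(PySem.Int.floordiv (-n) l) = k := by
  have hpos : (0:Int) < l := by omega
  have h1 := (pvCeil_le n l k hpos).mpr hk2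
  have h2 : ¬ (-(PySem.Int.floordiv (-n) l) ≤ k - 1) :=
    fun h => hk1 ((pvCeil_le n l (k - 1) hpos).mp h)
  omega

theorem loop_done (n l : Int) (hl : 2 ≤ l) (h : n ≤ l * 4) :
    dimLoop n l hl = [l, if n ≤ l then 1 else -(PySem.Int.floordiv (-n) l)] := by
  rw [dimLoop]
  by_cases h1 : n ≤ l * 1
  · rw [if_pos h1, if_pos (show n ≤ l by omega)]
  · rw [if_neg h1, if_neg (show ¬ n ≤ l by omega)]
    by_cases h2 : n ≤ l * 2
    · rw [if_pos h2, Wval_eq n l 2 hl (by omega) (by omega)]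
    · rw [if_neg h2]
      by_cases h3 : n ≤ l * 3
      · rw [if_pos h3, Wval_eq n l 3 hl (by omega) (by omega)]
      · rw [if_neg h3, if_pos (show n ≤ l * 4 from h), Wval_eq n l 4 hl (by omega) (by omega)]

theorem loop_step (n l : Int) (hl : 2 ≤ l) (h : ¬ n ≤ l * 4) :
    dimLoop n l hl = dimLoop n (l + 1) (by omega) := by
  rw [dimLoop]
  have h1 : ¬ n ≤ l * 1 := by omega
  have h2 : ¬ n ≤ l * 2 := by omega
  have h3 : ¬ n ≤ l * 3 := by omega
  rw [if_neg h1, if_neg h2, if_neg h3, if_neg h]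

theorem loop_main (n : Int) : ∀ (k : Nat) (l : Int) (hl : 2 ≤ l),
    l ≤ Lval n → (Lval n - l).toNat = k → dimLoop n l hl = [Lval n, Wval n] := by
  intro k
  induction k with
  | zero =>
    intro l hl hle hk
    have heq : l = Lval n := by omega
    have h4 : n ≤ l * 4 := by rw [heq]; exact Lval_le4 n
    rw [loop_done n l hl h4, heq]
    rfl
  | succ k ih =>
    intro l hl hle hk
    have hlt : l < Lval n := by omega
    rw [loop_step n l hl (Lval_min n l hl hlt)]
    exact ih (l + 1) (by omega) (by omega) (by omega)

-- ===== VERDICT (by name: the statement is the Claim_ definition above) =====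
theorem dimensions_spec : Claim_equal_dimensions := by
  intro n max _
  show dimensions n max = dimensions_alt n max
  have := loop_main n (Lval n - 2).toNat 2 (by norm_num) (Lval_ge n) rfl
  unfold dimensions
  rw [this]
  rfl
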